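-- pv_equiv track=rewrite | github.com/omnihenry/python | text_expansion/text_expansion.py | expand_text
-- ===== SOURCE A (Python) =====
-- def expand_text(string, mapping, loop):
--     '''
--     Find mapping recursively until the max loop
--
--     :param string: the text that contains space-separated words to expand
--     :param mapping: the dictionary needed to find out mapping
--     :param loop: the maximum rounds of looking up the dictionary
--     :type string: str
--     :type mapping: dict
--     :type loop: int
--     :returns: a string that contains the expanded text
--     :rtype: str
--     '''
--     loop -= 1
--     if loop < 0:
--         return string
--
--     word_list = []          # used to save the result
--     for word in string.split():
--         if word in mapping:
--             word_list.append(expand_text(mapping[word], mapping, loop))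
--         else:
--             word_list.append(word)
--     return ' '.join(word_list)
-- ===== SOURCE B (Python) =====
-- def expand_text(string, mapping, loop):
--     # Bottom-up: build, level by level, the table of each key's expansion with
--     # d remaining rounds; stop early once the table reaches a fixpoint.
--     if loop <= 0:
--         return string
--     table = dict(mapping)  # expansions with 1 remaining round are the raw values
--     for _ in range(loop - 1):
--         new = {k: ' '.join(table[w] if w in table else w for w in v.split())
--                for k, v in mapping.items()}
--         if new == table:
--             break
--         table = new
--     return ' '.join(table[w] if w in table else w for w in string.split())
-- ===== Notes on version B (the rewrite author's own statement) =====
-- stated objective: alternative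
-- what changed: Replaced the top-down per-word recursion by a bottom-up dynamic program that builds a per-depth expansion table for all mapping keys and stops early at a fixpoint, then applies one table pass to the input string.
import Mathlib
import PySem

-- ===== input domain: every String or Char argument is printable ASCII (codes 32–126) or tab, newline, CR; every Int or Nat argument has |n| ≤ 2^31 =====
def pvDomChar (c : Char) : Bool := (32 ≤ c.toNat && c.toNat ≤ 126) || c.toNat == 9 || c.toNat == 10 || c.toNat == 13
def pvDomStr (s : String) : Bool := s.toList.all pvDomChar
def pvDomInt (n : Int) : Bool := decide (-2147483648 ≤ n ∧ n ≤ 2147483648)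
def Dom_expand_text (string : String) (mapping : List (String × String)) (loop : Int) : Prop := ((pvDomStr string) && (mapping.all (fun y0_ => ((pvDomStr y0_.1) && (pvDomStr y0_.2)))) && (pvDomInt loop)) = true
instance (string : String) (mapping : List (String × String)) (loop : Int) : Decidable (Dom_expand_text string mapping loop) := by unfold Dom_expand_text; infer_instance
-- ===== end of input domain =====

-- B replaces A's top-down (possibly exponentially re-expanding) recursion by a
-- bottom-up per-level expansion table with a fixpoint early exit; return value only.

-- ===== PORT A =====
-- literal transliteration of A: decrement loop, recurse per word, join with ' '
def expand_text (string : String) (mapping : List (String × String)) (loop : Int) : String :=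
  let loop' := loop - 1
  if loop' < 0 then string
  else
    let word_list := (PySem.Str.split₀ string).map (fun word =>
      match List.lookup word mapping with
      | some v => expand_text v mapping loop'
      | none => word)
    PySem.Str.join " " word_list
termination_by loop.toNat
decreasing_by simp_all; omega

-- ===== PORT B =====
-- one substitution pass with the given table (Source B's join over s.split())
def pvStep (table : List (String × String)) (s : String) : String :=
  PySem.Str.join " " ((PySem.Str.split₀ s).map (fun w =>
    match List.lookup w table with
    | some v => v
    | none => w))

-- Source B's for-loop with its `break` on fixpoint
def pvIter (mapping : List (String × String)) (table : List (String × String)) : Nat → List (String × String)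
  | 0 => table
  | n + 1 =>
    let new := mapping.map (fun kv => (kv.1, pvStep table kv.2))
    if new = table then table else pvIter mapping new n

def expand_text_alt (string : String) (mapping : List (String × String)) (loop : Int) : String :=
  if loop ≤ 0 then string
  else pvStep (pvIter mapping mapping (loop - 1).toNat) string

-- ===== PRECONDITION & SPEC =====
def Spec_expand_text (string : String) (mapping : List (String × String)) (loop : Int) (out : String) : Prop := out = expand_text_alt string mapping loop
instance (string : String) (mapping : List (String × String)) (loop : Int) (out : String) : Decidable (Spec_expand_text string mapping loop out) := by unfold Spec_expand_text; infer_instance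

-- ===== CLAIM (what is proved, stated in full; the proofs are below) =====
def Claim_equal_expand_text : Prop := ∀ (string : String) (mapping : List (String × String)) (loop : Int), Dom_expand_text string mapping loop → Spec_expand_text string mapping loop (expand_text string mapping loop)

-- ===== LEMMAS AND PROOFS =====

-- clean semantics: expansion with d remaining rounds
def Gex (mapping : List (String × String)) : Nat → String → String
  | 0 => fun s => s
  | d + 1 => fun s =>
    PySem.Str.join " " ((PySem.Str.split₀ s).map (fun w =>
      match List.lookup w mapping with
      | some v => Gex mapping d v
      | none => w))

-- the ideal table after d refinement steps (pvIter without the break)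
def Tab (mapping : List (String × String)) : Nat → List (String × String)
  | 0 => mapping
  | d + 1 => mapping.map (fun kv => (kv.1, pvStep (Tab mapping d) kv.2))

theorem lookup_map_snd {β : Type} (m : List (String × String)) (f : String → β) (w : String) :
    List.lookup w (m.map (fun kv => (kv.1, f kv.2))) = (List.lookup w m).map f := by
  induction m with
  | nil => simp [List.lookup]
  | cons kv rest ih =>
    simp only [List.map, List.lookup]
    by_cases h : w == kv.1 <;> simp [h, ih]

theorem step_eq_Gex (m tbl : List (String × String)) (d : Nat)
    (h : ∀ w, List.lookup w tbl = (List.lookup w m).map (Gex m d)) (s : String) :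
    pvStep tbl s = Gex m (d + 1) s := by
  simp only [pvStep, Gex]
  congr 1
  apply List.map_congr_left
  intro w _
  rw [h w]
  cases List.lookup w m <;> simp

theorem lookup_Tab (m : List (String × String)) (d : Nat) (w : String) :
    List.lookup w (Tab m d) = (List.lookup w m).map (Gex m d) := by
  induction d generalizing w with
  | zero =>
    simp only [Tab]
    cases List.lookup w m <;> simp [Gex]
  | succ d ih =>
    simp only [Tab]
    rw [lookup_map_snd]
    cases h : List.lookup w m with
    | none => simp
    | some v => simp [step_eq_Gex m (Tab m d) d (fun w => ih w) v, Gex]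

theorem step_Tab (m : List (String × String)) (d : Nat) (s : String) :
    pvStep (Tab m d) s = Gex m (d + 1) s :=
  step_eq_Gex m (Tab m d) d (lookup_Tab m d) s

theorem Tab_stable (m : List (String × String)) (d : Nat)
    (h : Tab m (d + 1) = Tab m d) : ∀ k, Tab m (d + k) = Tab m d := by
  intro k
  induction k with
  | zero => rfl
  | succ k ih =>
    have : Tab m (d + k + 1) = m.map (fun kv => (kv.1, pvStep (Tab m (d + k)) kv.2)) := rfl
    rw [show d + (k + 1) = d + k + 1 by omega, this, ih]
    exact h

theorem pvIter_Gex (m : List (String × String)) (fuel : Nat) :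
    ∀ d s, pvStep (pvIter m (Tab m d) fuel) s = Gex m (d + fuel + 1) s := by
  induction fuel with
  | zero => intro d s; simpa using step_Tab m d s
  | succ fuel ih =>
    intro d s
    simp only [pvIter]
    have hnew : m.map (fun kv => (kv.1, pvStep (Tab m d) kv.2)) = Tab m (d + 1) := rfl
    rw [hnew]
    by_cases h : Tab m (d + 1) = Tab m d
    · rw [if_pos h]
      have hst : Tab m (d + (fuel + 1)) = Tab m d := Tab_stable m d h (fuel + 1)
      have := step_Tab m (d + (fuel + 1)) s
      rw [hst] at this
      rw [show d + (fuel + 1) + 1 = d + (fuel + 1) + 1 from rfl] at this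
      rw [this]
    · rw [if_neg h, ih (d + 1) s]
      congr 1
      omega

theorem expand_eq_Gex (m : List (String × String)) :
    ∀ (n : Nat) (loop : Int), loop.toNat = n → ∀ s, expand_text s m loop = Gex m n s := by
  intro n
  induction n with
  | zero =>
    intro loop h s
    have hle : loop ≤ 0 := by omega
    rw [expand_text]
    simp only [Gex]
    rw [if_pos (by omega)]
  | succ n ih =>
    intro loop h s
    have h1 : ¬ (loop - 1 < 0) := by omega
    rw [expand_text]
    simp only
    rw [if_neg h1]
    simp only [Gex]
    congr 1
    apply List.map_congr_left
    intro w _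
    cases List.lookup w m with
    | none => rfl
    | some v => exact ih (loop - 1) (by omega) v

-- ===== VERDICT (by name: the statement is the Claim_ definition above) =====
theorem expand_text_spec : Claim_equal_expand_text := by
  intro s m loop _
  unfold Spec_expand_text expand_text_alt
  by_cases h : loop ≤ 0
  · rw [if_pos h, expand_text]
    simp only
    rw [if_pos (by omega)]
  · rw [if_neg h]
    have h3 := pvIter_Gex m (loop - 1).toNat 0 s
    simp only [Tab] at h3
    rw [h3, expand_eq_Gex m loop.toNat loop rfl s]
    congr 1
    omega
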